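-- pv_equiv track=rewrite | github.com/Eli-Goldner/cnlpt_pipeline | cnlp_pipeline.py | get_anafora_tags
-- ===== SOURCE A (Python) =====
-- from itertools import chain, groupby
--
-- def get_anafora_tags(raw_partitions, sentence):
--     span_begin = 0
--     annotated_list = []
--     split_sent = sentence.split(' ')
--     for tag_idx, span_iter in groupby(raw_partitions):
--         span_end = len(list(span_iter)) + span_begin
--         span = split_sent[span_begin:span_end]
--         ann_span = span
--         if tag_idx == 1:
--             ann_span = ['<a1>'] + span + ['</a1>']
--         elif tag_idx == 2:
--             ann_span = ['<a2>'] + span + ['</a2>']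
--         annotated_list.extend(ann_span)
--         span_begin = span_end
--     return annotated_list
-- ===== SOURCE B (Python) =====
-- def get_anafora_tags(raw_partitions, sentence):
--     words = iter(sentence.split(' '))
--     out = []
--     prev = None
--     for tag in raw_partitions:
--         if prev != tag:
--             if prev == 1:
--                 out.append('</a1>')
--             elif prev == 2:
--                 out.append('</a2>')
--             if tag == 1:
--                 out.append('<a1>')
--             elif tag == 2:
--                 out.append('<a2>')
--             prev = tag
--         w = next(words, None)
--         if w is not None:
--             out.append(w)
--     if prev == 1:
--         out.append('</a1>')
--     elif prev == 2:
--         out.append('</a2>')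
--     return out
-- ===== Notes on version B (the rewrite author's own statement) =====
-- stated objective: faster
-- what changed: Replaces itertools.groupby plus cumulative slice bookkeeping with one element-wise pass that keeps the previous tag as state, emitting close/open tags at run transitions and consuming words from a single iterator.
import Mathlib
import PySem

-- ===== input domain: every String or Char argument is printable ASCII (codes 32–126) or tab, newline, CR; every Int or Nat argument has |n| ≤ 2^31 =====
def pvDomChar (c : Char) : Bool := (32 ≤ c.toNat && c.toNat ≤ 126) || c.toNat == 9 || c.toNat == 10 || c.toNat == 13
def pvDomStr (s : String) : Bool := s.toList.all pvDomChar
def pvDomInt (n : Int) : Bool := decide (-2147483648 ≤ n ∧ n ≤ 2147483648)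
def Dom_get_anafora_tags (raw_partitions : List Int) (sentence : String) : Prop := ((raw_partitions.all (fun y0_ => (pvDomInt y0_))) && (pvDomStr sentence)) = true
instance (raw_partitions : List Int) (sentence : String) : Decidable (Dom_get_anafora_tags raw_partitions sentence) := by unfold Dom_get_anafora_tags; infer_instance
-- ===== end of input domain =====

-- B replaces itertools.groupby plus cumulative slice bookkeeping with one element-wise
-- pass that keeps the previous tag as state (objective: simpler).

-- ===== PORT A =====
-- itertools.groupby as run-length encoding: list of (key, length of run)
def pyGroupby (l : List Int) : List (Int × Nat) :=
  match l with
  | [] => []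
  | x :: xs =>
      (x, (xs.takeWhile (· == x)).length + 1) :: pyGroupby (xs.dropWhile (· == x))
termination_by l.length
decreasing_by
  have := List.length_dropWhile_le (p := (· == x)) (l := xs)
  simp; omega

def get_anafora_tags (raw_partitions : List Int) (sentence : String) : List String :=
  let split_sent := (PySem.Str.split? sentence " ").getD []
  let r := (pyGroupby raw_partitions).foldl
    (fun (st : Int × List String) (g : Int × Nat) =>
      let span_begin := st.1
      let span_end := (g.2 : Int) + span_begin
      let span := PySem.List.slice split_sent (some span_begin) (some span_end)
      let ann_span :=
        if g.1 == 1 then ["<a1>"] ++ span ++ ["</a1>"]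
        else if g.1 == 2 then ["<a2>"] ++ span ++ ["</a2>"]
        else span
      (span_end, st.2 ++ ann_span))
    ((0 : Int), ([] : List String))
  r.2

-- ===== PORT B =====
def altClose (prev : Option Int) : List String :=
  match prev with
  | none => []
  | some p => if p == 1 then ["</a1>"] else if p == 2 then ["</a2>"] else []

def altOpen (t : Int) : List String :=
  if t == 1 then ["<a1>"] else if t == 2 then ["<a2>"] else []

-- the loop of Source B: tags left, words left (the iterator), previous tag
def altLoop : List Int → List String → Option Int → List String
  | [], _, prev => altClose prev
  | t :: ts, ws, prev =>
      let trans := if prev == some t then ([] : List String) else altClose prev ++ altOpen t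
      let word := match ws with | [] => ([] : List String) | w :: _ => [w]
      trans ++ word ++ altLoop ts ws.tail (some t)

def get_anafora_tags_alt (raw_partitions : List Int) (sentence : String) : List String :=
  altLoop raw_partitions ((PySem.Str.split? sentence " ").getD []) none

-- ===== PRECONDITION & SPEC =====
def Spec_get_anafora_tags (raw_partitions : List Int) (sentence : String) (out : List String) : Prop := out = get_anafora_tags_alt raw_partitions sentence
instance (raw_partitions : List Int) (sentence : String) (out : List String) : Decidable (Spec_get_anafora_tags raw_partitions sentence out) := by unfold Spec_get_anafora_tags; infer_instance

-- ===== CLAIM (what is proved, stated in full; the proofs are below) =====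
def Claim_equal_get_anafora_tags : Prop := ∀ (raw_partitions : List Int) (sentence : String), Dom_get_anafora_tags raw_partitions sentence → Spec_get_anafora_tags raw_partitions sentence (get_anafora_tags raw_partitions sentence)

-- ===== LEMMAS AND PROOFS =====

-- common intermediate form: A's per-group output, consuming words from the front
def runA (gs : List (Int × Nat)) (ws : List String) : List String :=
  match gs with
  | [] => []
  | (t, n) :: gs => altOpen t ++ ws.take n ++ altClose (some t) ++ runA gs (ws.drop n)

-- A's fold equals runA, with the word prefix already consumed
theorem lemA (ws : List String) (gs : List (Int × Nat)) :
    ∀ (b : Nat) (acc : List String),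
      ((gs.foldl
        (fun (st : Int × List String) (g : Int × Nat) =>
          let span_begin := st.1
          let span_end := (g.2 : Int) + span_begin
          let span := PySem.List.slice ws (some span_begin) (some span_end)
          let ann_span :=
            if g.1 == 1 then ["<a1>"] ++ span ++ ["</a1>"]
            else if g.1 == 2 then ["<a2>"] ++ span ++ ["</a2>"]
            else span
          (span_end, st.2 ++ ann_span))
        (((b : Nat) : Int), acc)).2) = acc ++ runA gs (ws.drop b) := by
  induction gs with
  | nil => intro b acc; simp [runA]
  | cons g gs ih =>
      intro b acc
      obtain ⟨t, n⟩ := g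
      have hcast : ((n : Int) + (b : Int)) = (((n + b : Nat) : Nat) : Int) := by push_cast; ring
      simp only [List.foldl_cons, hcast]
      rw [ih (n + b)]
      have hslice : PySem.List.slice ws (some ((b : Nat) : Int)) (some (((n + b : Nat) : Nat) : Int))
          = (ws.drop b).take n := by
        rw [PySem.List.slice_natCast]; congr 1; omega
      simp only [hslice, runA, altOpen, altClose]
      rw [show ws.drop (n + b) = (ws.drop b).drop n by rw [List.drop_drop]; congr 1; omega]
      by_cases h1 : t = 1
      · simp [h1]
      · by_cases h2 : t = 2 <;> simp [h1, h2]

-- B's loop with previous tag t equals: rest of the run's words, close tag, then runA on the remaining groups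
theorem lemB (ts : List Int) : ∀ (ws : List String) (t : Int),
    altLoop ts ws (some t)
      = ws.take ((ts.takeWhile (· == t)).length) ++ altClose (some t)
        ++ runA (pyGroupby (ts.dropWhile (· == t))) (ws.drop ((ts.takeWhile (· == t)).length)) := by
  induction ts with
  | nil => intro ws t; simp [altLoop, pyGroupby, runA, altClose]
  | cons t' ts ih =>
      intro ws t
      by_cases h : t' = t
      · subst h
        simp only [altLoop, List.takeWhile_cons, List.dropWhile_cons, beq_self_eq_true]
        rw [ih ws.tail t']
        cases ws <;> simp
      · have hbeq : (t' == t) = false := by simp [h]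
        have hne : (some t == some t') = false := by simp [Ne.symm h]
        simp only [altLoop, List.takeWhile_cons, List.dropWhile_cons, hbeq, hne,
          Bool.false_eq_true, if_false, List.length_nil, List.take_zero, List.drop_zero,
          List.nil_append, pyGroupby, runA]
        rw [ih ws.tail t']
        cases ws <;> simp

-- B's loop from the initial state equals runA over the groupby of the tags
theorem mainB (raw : List Int) (ws : List String) :
    altLoop raw ws none = runA (pyGroupby raw) ws := by
  cases raw with
  | nil => simp [altLoop, pyGroupby, runA, altClose]
  | cons t ts =>
      simp only [altLoop, altClose, pyGroupby, runA]
      rw [lemB ts ws.tail t]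
      cases ws <;> simp [altClose]

-- ===== VERDICT (by name: the statement is the Claim_ definition above) =====
theorem get_anafora_tags_spec : Claim_equal_get_anafora_tags := by
  intro raw sentence _
  unfold Spec_get_anafora_tags get_anafora_tags get_anafora_tags_alt
  have h := lemA ((PySem.Str.split? sentence " ").getD []) (pyGroupby raw) 0 []
  simp only [Nat.cast_zero, List.drop_zero, List.nil_append] at h
  rw [h, mainB]
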